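-- pv_equiv track=rewrite | github.com/maciej-janusz/asd | kol3_2022/kol2a.py | drivers_rek
-- ===== SOURCE A (Python) =====
-- from math import inf
--
-- def drivers_rek( P, B ):
--     LIMIT = 3
--     n = len(P)
--     P = [(P[i][0], P[i][1], i) for i in range(n)]
--     P.sort()
--
--     memo = {}
--     def f(driver, i, j):
--         if (driver, i, j) in memo:
--             return memo[(driver, i, j)]
--
--         if i == B or i > n-1:
--             return 0, []
--
--         best = inf
--         best_changes = []
--         if P[i][1]:
--             val, changes = f(not driver, i + 1, 1)
--             if val < best:
--                 best = val
--                 best_changes = [P[i][2]] + changes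
--             if j < LIMIT:
--                 val, changes = f(driver, i + 1, j + 1)
--                 if val < best:
--                     best = val
--                     best_changes = changes
--         else:
--             if driver:
--                 val, changes = f(driver, i + 1, j)
--                 val += 1
--                 if val < best:
--                     best = val
--                     best_changes = changes
--             else:
--                 val, changes = f(driver, i + 1, j)
--                 if val < best:
--                     best = val
--                     best_changes = changes
--
--         memo[(driver, i ,j)] = best, best_changes
--         return best, best_changes
--
--
--     val, changes = f(False, 0, 1)
--
--     return changes
-- ===== SOURCE B (Python) =====
-- def drivers_rek(P, B):
--     # Bottom-up DP over (driver, j) storing only value + choice per state,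
--     # then one forward backtracking pass to reconstruct the change indices.
--     LIMIT = 3
--     n = len(P)
--     Q = sorted((P[i][0], P[i][1], i) for i in range(n))
--     m = B if 0 <= B <= n else n
--     states = [(d, j) for d in (False, True) for j in (1, 2, 3)]
--     nxt = {s: 0 for s in states}
--     chs = []
--     for i in reversed(range(m)):
--         cur = {}
--         ch = {}
--         for (d, j) in states:
--             if Q[i][1]:
--                 v_sw = nxt[(not d, 1)]
--                 if j < LIMIT and nxt[(d, j + 1)] < v_sw:
--                     cur[(d, j)] = nxt[(d, j + 1)]
--                     ch[(d, j)] = False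
--                 else:
--                     cur[(d, j)] = v_sw
--                     ch[(d, j)] = True
--             else:
--                 cur[(d, j)] = nxt[(d, j)] + (1 if d else 0)
--                 ch[(d, j)] = False
--         chs = [ch] + chs
--         nxt = cur
--     res = []
--     d, j = False, 1
--     for i in range(m):
--         if chs[i][(d, j)]:
--             res.append(Q[i][2])
--             d, j = not d, 1
--         elif Q[i][1]:
--             j += 1
--     return res
-- ===== Notes on version B (the rewrite author's own statement) =====
-- stated objective: faster
-- what changed: A memoizes a full change-index list per (driver,day,streak) state in a top-down recursion, copying lists at every state; B runs a bottom-up DP over the 6 (driver,streak) states per day storing only value and choice, then reconstructs the change list in one forward backtracking pass.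
import Mathlib
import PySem

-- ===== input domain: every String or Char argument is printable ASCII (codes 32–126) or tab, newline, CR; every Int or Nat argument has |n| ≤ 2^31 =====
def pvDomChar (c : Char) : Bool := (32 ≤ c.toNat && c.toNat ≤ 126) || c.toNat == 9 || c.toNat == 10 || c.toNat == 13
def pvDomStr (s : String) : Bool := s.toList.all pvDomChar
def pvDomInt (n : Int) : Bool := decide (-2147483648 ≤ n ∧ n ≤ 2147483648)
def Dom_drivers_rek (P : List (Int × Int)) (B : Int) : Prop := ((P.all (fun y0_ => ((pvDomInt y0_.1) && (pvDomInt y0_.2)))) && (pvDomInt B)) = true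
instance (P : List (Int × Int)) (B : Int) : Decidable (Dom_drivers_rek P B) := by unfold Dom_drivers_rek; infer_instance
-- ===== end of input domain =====

-- B replaces A's memoisation of whole change-lists by a bottom-up value+choice DP
-- with a single backtracking pass (objective: faster — no list concatenation per state).
-- Both sort a fresh list of triples; neither mutates the caller's argument.

-- ===== PORT A =====
-- A's inner memoised recursion f(driver, i, j); the memo dict is threaded through.
-- Python's `best = inf` sentinel is always beaten by the first candidate compared
-- against it, so each branch below starts `best` at that first candidate (exact).
def pvFA (Q : List (Int × Int × Int)) (n B : Int)
    (memo : PySem.Dict (Bool × Int × Int) (Int × List Int))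
    (driver : Bool) (i j : Int) :
    (Int × List Int) × PySem.Dict (Bool × Int × Int) (Int × List Int) :=
  match memo.get? (driver, i, j) with
  | some r => (r, memo)
  | none =>
    if h : i = B ∨ i > n - 1 then ((0, []), memo)
    else
      let t := PySem.List.pyGetD Q i (0, 0, 0)
      let res :=
        if t.2.1 ≠ 0 then
          let r1 := pvFA Q n B memo (!driver) (i + 1) 1
          let best := r1.1.1
          let bestChanges := t.2.2 :: r1.1.2
          if j < 3 then
            let r2 := pvFA Q n B r1.2 driver (i + 1) (j + 1)
            if r2.1.1 < best then (r2.1, r2.2) else ((best, bestChanges), r2.2)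
          else ((best, bestChanges), r1.2)
        else
          if driver then
            let r1 := pvFA Q n B memo driver (i + 1) j
            ((r1.1.1 + 1, r1.1.2), r1.2)
          else
            let r1 := pvFA Q n B memo driver (i + 1) j
            (r1.1, r1.2)
      (res.1, res.2.insert (driver, i, j) res.1)
  termination_by (n - i).toNat
  decreasing_by all_goals omega

-- P.sort() on the triples (x, y, i) is Python's lexicographic tuple sort; since the
-- third components i are 0,1,2,… in list order, the STABLE sort by the first two
-- components is exactly that lexicographic sort.
def drivers_rek (P : List (Int × Int)) (B : Int) : List Int :=
  let n : Int := P.length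
  let Q := PySem.List.sorted2
    ((PySem.List.pyRange 0 n 1).map (fun i =>
      ((PySem.List.pyGetD P i (0, 0)).1, (PySem.List.pyGetD P i (0, 0)).2, i)))
    (fun t => t.1) (fun t => t.2.1)
  (pvFA Q n B PySem.Dict.empty false 0 1).1.2

-- ===== PORT B =====
def pvStates : List (Bool × Int) :=
  [false, true].flatMap (fun d => ([1, 2, 3] : List Int).map (fun j => (d, j)))

-- one iteration of B's backward loop: from the value table `nxt` for level i+1,
-- build value table `cur` and choice table `ch` for level i (nxt[k] is a plain
-- Python lookup whose key is always present; getD's default is never used)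
def pvStepDown (Q : List (Int × Int × Int))
    (st : PySem.Dict (Bool × Int) Int × List (PySem.Dict (Bool × Int) Bool)) (i : Int) :
    PySem.Dict (Bool × Int) Int × List (PySem.Dict (Bool × Int) Bool) :=
  let nxt := st.1
  let pause := (PySem.List.pyGetD Q i (0, 0, 0)).2.1
  let cc := pvStates.foldl
    (fun cc s =>
      if pause ≠ 0 then
        let vsw := nxt.getD (!s.1, 1) 0
        if s.2 < 3 ∧ nxt.getD (s.1, s.2 + 1) 0 < vsw then
          (cc.1.insert s (nxt.getD (s.1, s.2 + 1) 0), cc.2.insert s false)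
        else (cc.1.insert s vsw, cc.2.insert s true)
      else
        (cc.1.insert s (nxt.getD s 0 + (if s.1 then 1 else 0)), cc.2.insert s false))
    (PySem.Dict.empty, PySem.Dict.empty)
  (cc.1, cc.2 :: st.2)

-- one iteration of B's forward backtracking loop over state (res, d, j)
def pvStepUp (Q : List (Int × Int × Int)) (chs : List (PySem.Dict (Bool × Int) Bool))
    (st : List Int × Bool × Int) (i : Int) : List Int × Bool × Int :=
  let ch := PySem.List.pyGetD chs i PySem.Dict.empty
  if ch.getD (st.2.1, st.2.2) false then
    (st.1 ++ [(PySem.List.pyGetD Q i (0, 0, 0)).2.2], !st.2.1, 1)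
  else if (PySem.List.pyGetD Q i (0, 0, 0)).2.1 ≠ 0 then (st.1, st.2.1, st.2.2 + 1)
  else st

def drivers_rek_alt (P : List (Int × Int)) (B : Int) : List Int :=
  let n : Int := P.length
  let Q := PySem.List.sorted2
    ((PySem.List.pyRange 0 n 1).map (fun i =>
      ((PySem.List.pyGetD P i (0, 0)).1, (PySem.List.pyGetD P i (0, 0)).2, i)))
    (fun t => t.1) (fun t => t.2.1)
  let m : Int := if 0 ≤ B ∧ B ≤ n then B else n
  let nxt0 := pvStates.foldl (fun d s => d.insert s (0 : Int)) PySem.Dict.empty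
  let down := ((PySem.List.pyRange 0 m 1).reverse).foldl (pvStepDown Q) (nxt0, [])
  let bt := (PySem.List.pyRange 0 m 1).foldl (pvStepUp Q down.2) ([], false, (1 : Int))
  bt.1

-- ===== PRECONDITION & SPEC =====
def Spec_drivers_rek (P : List (Int × Int)) (B : Int) (out : List Int) : Prop := out = drivers_rek_alt P B
instance (P : List (Int × Int)) (B : Int) (out : List Int) : Decidable (Spec_drivers_rek P B out) := by unfold Spec_drivers_rek; infer_instance

-- ===== CLAIM (what is proved, stated in full; the proofs are below) =====
def Claim_equal_drivers_rek : Prop := ∀ (P : List (Int × Int)) (B : Int), Dom_drivers_rek P B → Spec_drivers_rek P B (drivers_rek P B)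

-- ===== LEMMAS AND PROOFS =====

-- the memo-free recursion both ports compute
def pvG (Q : List (Int × Int × Int)) (n B : Int) (driver : Bool) (i j : Int) : Int × List Int :=
  if i = B ∨ i > n - 1 then (0, [])
  else
    let t := PySem.List.pyGetD Q i (0, 0, 0)
    if t.2.1 ≠ 0 then
      if j < 3 ∧ (pvG Q n B driver (i + 1) (j + 1)).1 < (pvG Q n B (!driver) (i + 1) 1).1 then
        pvG Q n B driver (i + 1) (j + 1)
      else ((pvG Q n B (!driver) (i + 1) 1).1, t.2.2 :: (pvG Q n B (!driver) (i + 1) 1).2)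
    else
      ((pvG Q n B driver (i + 1) j).1 + (if driver then 1 else 0), (pvG Q n B driver (i + 1) j).2)
  termination_by (n - i).toNat
  decreasing_by all_goals omega

theorem pvG_base (Q : List (Int × Int × Int)) (n B : Int) (d : Bool) (i j : Int)
    (h : i = B ∨ i > n - 1) : pvG Q n B d i j = (0, []) := by
  rw [pvG, if_pos h]

theorem pvG_pause_stay (Q : List (Int × Int × Int)) (n B : Int) (d : Bool) (i j : Int)
    (hnb : ¬(i = B ∨ i > n - 1)) (hp : (PySem.List.pyGetD Q i (0, 0, 0)).2.1 ≠ 0)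
    (hc : j < 3 ∧ (pvG Q n B d (i + 1) (j + 1)).1 < (pvG Q n B (!d) (i + 1) 1).1) :
    pvG Q n B d i j = pvG Q n B d (i + 1) (j + 1) := by
  rw [pvG, if_neg hnb]; simp only [hp, if_true, ne_eq, not_false_eq_true, if_pos hc]

theorem pvG_pause_switch (Q : List (Int × Int × Int)) (n B : Int) (d : Bool) (i j : Int)
    (hnb : ¬(i = B ∨ i > n - 1)) (hp : (PySem.List.pyGetD Q i (0, 0, 0)).2.1 ≠ 0)
    (hc : ¬(j < 3 ∧ (pvG Q n B d (i + 1) (j + 1)).1 < (pvG Q n B (!d) (i + 1) 1).1)) :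
    pvG Q n B d i j =
      ((pvG Q n B (!d) (i + 1) 1).1,
        (PySem.List.pyGetD Q i (0, 0, 0)).2.2 :: (pvG Q n B (!d) (i + 1) 1).2) := by
  rw [pvG, if_neg hnb]; simp only [hp, ne_eq, not_false_eq_true, if_true, if_neg hc]

theorem pvG_nopause (Q : List (Int × Int × Int)) (n B : Int) (d : Bool) (i j : Int)
    (hnb : ¬(i = B ∨ i > n - 1)) (hp : (PySem.List.pyGetD Q i (0, 0, 0)).2.1 = 0) :
    pvG Q n B d i j =
      ((pvG Q n B d (i + 1) j).1 + (if d then 1 else 0), (pvG Q n B d (i + 1) j).2) := by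
  rw [pvG, if_neg hnb]; simp [hp]

-- ===== A side: the memo invariant =====
def pvInv (Q : List (Int × Int × Int)) (n B : Int)
    (memo : PySem.Dict (Bool × Int × Int) (Int × List Int)) : Prop :=
  ∀ k v, memo.get? k = some v → v = pvG Q n B k.1 k.2.1 k.2.2

theorem pvInv_insert (Q : List (Int × Int × Int)) (n B : Int)
    (memo : PySem.Dict (Bool × Int × Int) (Int × List Int))
    (k : Bool × Int × Int) (v : Int × List Int)
    (h : pvInv Q n B memo) (hk : v = pvG Q n B k.1 k.2.1 k.2.2) :
    pvInv Q n B (memo.insert k v) := by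
  intro k' v' h'
  rw [PySem.Dict.get?_insert] at h'
  split at h'
  · rename_i he; cases h'; subst he; exact hk
  · exact h _ _ h'

theorem pvFA_correct (Q : List (Int × Int × Int)) (n B : Int) :
    ∀ (fuel : Nat) (d : Bool) (i j : Int) (memo : PySem.Dict (Bool × Int × Int) (Int × List Int)),
      (n - i).toNat ≤ fuel → pvInv Q n B memo →
      (pvFA Q n B memo d i j).1 = pvG Q n B d i j ∧ pvInv Q n B (pvFA Q n B memo d i j).2 := by
  intro fuel
  induction fuel with
  | zero =>
    intro d i j memo hf hinv
    have hb : i = B ∨ i > n - 1 := by right; omega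
    rw [pvFA.eq_def]
    cases hm : memo.get? (d, i, j) with
    | some r => exact ⟨(hinv _ _ hm).symm ▸ rfl, hinv⟩
    | none =>
      simp only [dif_pos hb]
      exact ⟨(pvG_base Q n B d i j hb).symm, hinv⟩
  | succ f ih =>
    intro d i j memo hf hinv
    rw [pvFA.eq_def]
    cases hm : memo.get? (d, i, j) with
    | some r => exact ⟨(hinv _ _ hm).symm ▸ rfl, hinv⟩
    | none =>
      by_cases hb : i = B ∨ i > n - 1
      · simp only [dif_pos hb]
        exact ⟨(pvG_base Q n B d i j hb).symm, hinv⟩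
      · simp only [dif_neg hb]
        have hfr : (n - (i + 1)).toNat ≤ f := by omega
        by_cases hp : (PySem.List.pyGetD Q i (0, 0, 0)).2.1 ≠ 0
        · obtain ⟨e1, hi1⟩ := ih (!d) (i + 1) 1 memo hfr hinv
          by_cases hj : j < 3
          · obtain ⟨e2, hi2⟩ := ih d (i + 1) (j + 1) (pvFA Q n B memo (!d) (i + 1) 1).2 hfr hi1
            by_cases hlt : (pvFA Q n B (pvFA Q n B memo (!d) (i + 1) 1).2 d (i + 1) (j + 1)).1.1 <
                (pvFA Q n B memo (!d) (i + 1) 1).1.1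
            · have hc : j < 3 ∧ (pvG Q n B d (i + 1) (j + 1)).1 < (pvG Q n B (!d) (i + 1) 1).1 := by
                constructor
                · exact hj
                · rw [← e1, ← e2]; exact hlt
              simp only [if_pos hp, if_pos hj, if_pos hlt]
              refine ⟨?_, ?_⟩
              · rw [e2, ← pvG_pause_stay Q n B d i j hb hp hc]
              · apply pvInv_insert _ _ _ _ _ _ hi2
                rw [e2, ← pvG_pause_stay Q n B d i j hb hp hc]
            · have hc : ¬(j < 3 ∧ (pvG Q n B d (i + 1) (j + 1)).1 < (pvG Q n B (!d) (i + 1) 1).1) := by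
                rintro ⟨-, h2⟩; rw [← e1, ← e2] at h2; exact hlt h2
              simp only [if_pos hp, if_pos hj, if_neg hlt]
              refine ⟨?_, ?_⟩
              · rw [e1, ← pvG_pause_switch Q n B d i j hb hp hc]
              · apply pvInv_insert _ _ _ _ _ _ hi2
                rw [e1, ← pvG_pause_switch Q n B d i j hb hp hc]
          · have hc : ¬(j < 3 ∧ (pvG Q n B d (i + 1) (j + 1)).1 < (pvG Q n B (!d) (i + 1) 1).1) := by
              rintro ⟨h1, -⟩; exact hj h1
            simp only [if_pos hp, if_neg hj]
            refine ⟨?_, ?_⟩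
            · rw [e1, ← pvG_pause_switch Q n B d i j hb hp hc]
            · apply pvInv_insert _ _ _ _ _ _ hi1
              rw [e1, ← pvG_pause_switch Q n B d i j hb hp hc]
        · rw [ne_eq, not_not] at hp
          obtain ⟨e1, hi1⟩ := ih d (i + 1) j memo hfr hinv
          have hg := pvG_nopause Q n B d i j hb hp
          have hp' : ¬((PySem.List.pyGetD Q i (0, 0, 0)).2.1 ≠ 0) := by simpa using hp
          simp only [if_neg hp']
          cases d with
          | false =>
            simp only [Bool.false_eq_true, if_false]
            exact ⟨by rw [← e1] at hg; rw [hg]; simp,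
              pvInv_insert _ _ _ _ _ _ hi1 (by rw [← e1] at hg; rw [hg]; simp)⟩
          | true =>
            simp only [if_true]
            exact ⟨by rw [← e1] at hg; rw [hg]; simp,
              pvInv_insert _ _ _ _ _ _ hi1 (by rw [← e1] at hg; rw [hg]; simp)⟩


-- ===== B side =====
def pvVal (Q : List (Int × Int × Int)) (n B i : Int) (s : Bool × Int) : Int :=
  (pvG Q n B s.1 i s.2).1

def pvChoice (Q : List (Int × Int × Int)) (n B i : Int) (s : Bool × Int) : Bool :=
  if (PySem.List.pyGetD Q i (0, 0, 0)).2.1 ≠ 0 then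
    !(decide (s.2 < 3 ∧ (pvG Q n B s.1 (i + 1) (s.2 + 1)).1 < (pvG Q n B (!s.1) (i + 1) 1).1))
  else false

def pvChD (Q : List (Int × Int × Int)) (n B i : Int) : PySem.Dict (Bool × Int) Bool :=
  pvStates.foldl (fun d s => d.insert s (pvChoice Q n B i s)) PySem.Dict.empty

def pvGood (Q : List (Int × Int × Int)) (n B i : Int) (nxt : PySem.Dict (Bool × Int) Int) : Prop :=
  ∀ s ∈ pvStates, nxt.getD s 0 = pvVal Q n B i s

theorem pvStates_eq : pvStates = [(false, 1), (false, 2), (false, 3), (true, 1), (true, 2), (true, 3)] := rfl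

theorem pvChD_getD (Q : List (Int × Int × Int)) (n B i : Int) (s : Bool × Int)
    (hs : s ∈ pvStates) : (pvChD Q n B i).getD s false = pvChoice Q n B i s := by
  rw [pvStates_eq] at hs
  fin_cases hs <;>
    simp [pvChD, pvStates_eq, List.foldl, PySem.Dict.getD_insert]

theorem pvFoldPair {K V W : Type} [BEq K] (fv : K -> V) (fw : K -> W) (l : List K) :
    ∀ (a : PySem.Dict K V) (b : PySem.Dict K W),
      l.foldl (fun cc s => (cc.1.insert s (fv s), cc.2.insert s (fw s))) (a, b) =
        (l.foldl (fun d s => d.insert s (fv s)) a, l.foldl (fun d s => d.insert s (fw s)) b) := by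
  induction l with
  | nil => intro a b; rfl
  | cons x xs ih => intro a b; simpa [List.foldl] using ih (a.insert x (fv x)) (b.insert x (fw x))

theorem pvStepDown_spec (Q : List (Int × Int × Int)) (n B i : Int)
    (nxt : PySem.Dict (Bool × Int) Int) (cs : List (PySem.Dict (Bool × Int) Bool))
    (hnb : ¬(i = B ∨ i > n - 1)) (h1 : pvGood Q n B (i + 1) nxt) :
    pvGood Q n B i (pvStepDown Q (nxt, cs) i).1 ∧
      (pvStepDown Q (nxt, cs) i).2 = pvChD Q n B i :: cs := by
  have hF2 := h1 (false, 2) (by rw [pvStates_eq]; simp)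
  have hF3 := h1 (false, 3) (by rw [pvStates_eq]; simp)
  have hT2 := h1 (true, 2) (by rw [pvStates_eq]; simp)
  have hT3 := h1 (true, 3) (by rw [pvStates_eq]; simp)
  have e1 : ∀ d : Bool, nxt.getD (!d, 1) 0 = (pvG Q n B (!d) (i + 1) 1).1 := by
    intro d
    exact h1 (!d, 1) (by rw [pvStates_eq]; cases d <;> simp)
  have e2 : ∀ (d : Bool) (j : Int), j = 1 ∨ j = 2 →
      nxt.getD (d, j + 1) 0 = (pvG Q n B d (i + 1) (j + 1)).1 := by
    rintro d j (rfl | rfl) <;> cases d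
    · exact hF2
    · exact hT2
    · exact hF3
    · exact hT3
  have hval : ∀ s ∈ pvStates,
      (if (PySem.List.pyGetD Q i (0, 0, 0)).2.1 ≠ 0 then
        (if s.2 < 3 ∧ nxt.getD (s.1, s.2 + 1) 0 < nxt.getD (!s.1, 1) 0 then
          nxt.getD (s.1, s.2 + 1) 0 else nxt.getD (!s.1, 1) 0)
      else nxt.getD s 0 + (if s.1 then 1 else 0)) = pvVal Q n B i s := by
    rintro ⟨d, j⟩ hsm
    have hj : j = 1 ∨ j = 2 ∨ j = 3 := by
      rw [pvStates_eq] at hsm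
      simp only [List.mem_cons, List.not_mem_nil, or_false, Prod.mk.injEq] at hsm
      rcases hsm with ⟨-, h⟩ | ⟨-, h⟩ | ⟨-, h⟩ | ⟨-, h⟩ | ⟨-, h⟩ | ⟨-, h⟩ <;> simp [h]
    by_cases hp : (PySem.List.pyGetD Q i (0, 0, 0)).2.1 ≠ 0
    · rw [if_pos hp]
      simp only []
      rcases hj with rfl | rfl | rfl
      · rw [e1, e2 d 1 (Or.inl rfl)]
        by_cases hc : (1 : Int) < 3 ∧ (pvG Q n B d (i + 1) (1 + 1)).1 < (pvG Q n B (!d) (i + 1) 1).1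
        · rw [if_pos hc, pvVal]
          simp only []
          rw [pvG_pause_stay Q n B d i 1 hnb hp hc]
        · rw [if_neg hc, pvVal]
          simp only []
          rw [pvG_pause_switch Q n B d i 1 hnb hp hc]
      · rw [e1, e2 d 2 (Or.inr rfl)]
        by_cases hc : (2 : Int) < 3 ∧ (pvG Q n B d (i + 1) (2 + 1)).1 < (pvG Q n B (!d) (i + 1) 1).1
        · rw [if_pos hc, pvVal]
          simp only []
          rw [pvG_pause_stay Q n B d i 2 hnb hp hc]
        · rw [if_neg hc, pvVal]
          simp only []
          rw [pvG_pause_switch Q n B d i 2 hnb hp hc]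
      · rw [e1, if_neg (by simp : ¬((3 : Int) < 3 ∧ nxt.getD (d, 3 + 1) 0 < (pvG Q n B (!d) (i + 1) 1).1)), pvVal]
        simp only []
        rw [pvG_pause_switch Q n B d i 3 hnb hp (by simp)]
    · rw [if_neg hp, pvVal]
      simp only []
      rw [not_not] at hp
      rw [pvG_nopause Q n B d i j hnb hp]
      have := h1 (d, j) hsm
      rw [pvVal] at this
      simp only [] at this
      rw [this]
  have hch : ∀ s ∈ pvStates,
      (if (PySem.List.pyGetD Q i (0, 0, 0)).2.1 ≠ 0 then
        (if s.2 < 3 ∧ nxt.getD (s.1, s.2 + 1) 0 < nxt.getD (!s.1, 1) 0 then false else true)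
      else false) = pvChoice Q n B i s := by
    rintro ⟨d, j⟩ hsm
    have hj : j = 1 ∨ j = 2 ∨ j = 3 := by
      rw [pvStates_eq] at hsm
      simp only [List.mem_cons, List.not_mem_nil, or_false, Prod.mk.injEq] at hsm
      rcases hsm with ⟨-, h⟩ | ⟨-, h⟩ | ⟨-, h⟩ | ⟨-, h⟩ | ⟨-, h⟩ | ⟨-, h⟩ <;> simp [h]
    by_cases hp : (PySem.List.pyGetD Q i (0, 0, 0)).2.1 ≠ 0
    · rw [if_pos hp, pvChoice, if_pos hp]
      simp only []
      rcases hj with rfl | rfl | rfl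
      · rw [e1, e2 d 1 (Or.inl rfl)]
        by_cases hc : (1 : Int) < 3 ∧ (pvG Q n B d (i + 1) (1 + 1)).1 < (pvG Q n B (!d) (i + 1) 1).1 <;>
          simp [hc]
      · rw [e1, e2 d 2 (Or.inr rfl)]
        by_cases hc : (2 : Int) < 3 ∧ (pvG Q n B d (i + 1) (2 + 1)).1 < (pvG Q n B (!d) (i + 1) 1).1 <;>
          simp [hc]
      · simp
    · rw [if_neg hp, pvChoice, if_neg hp]
  have hmain : pvStepDown Q (nxt, cs) i =
      (pvStates.foldl (fun d s => d.insert s (pvVal Q n B i s)) PySem.Dict.empty,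
        pvChD Q n B i :: cs) := by
    rw [pvStepDown]
    simp only []
    rw [PySem.List.foldl_congr_mem pvStates _
      (fun (cc : PySem.Dict (Bool × Int) Int × PySem.Dict (Bool × Int) Bool) (s : Bool × Int) =>
        (cc.1.insert s (pvVal Q n B i s), cc.2.insert s (pvChoice Q n B i s)))
      (PySem.Dict.empty, PySem.Dict.empty) ?_, pvFoldPair (fun s => pvVal Q n B i s) (fun s => pvChoice Q n B i s) pvStates]
    · rfl
    · intro acc s hs
      beta_reduce
      rw [← hval s hs, ← hch s hs]
      by_cases hp : (PySem.List.pyGetD Q i (0, 0, 0)).2.1 ≠ 0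
      · by_cases hc : s.2 < 3 ∧ nxt.getD (s.1, s.2 + 1) 0 < nxt.getD (!s.1, 1) 0 <;>
          simp [hp, hc]
      · simp [hp]
  rw [hmain]
  refine ⟨?_, rfl⟩
  intro s hs
  rw [pvStates_eq] at hs
  fin_cases hs <;>
    simp [pvStates_eq, List.foldl, PySem.Dict.getD_insert]

theorem pvRangeCast (k : Nat) :
    PySem.List.pyRange 0 (k : Int) 1 = List.map (Nat.cast : Nat → Int) (List.range k) := by
  rw [PySem.List.pyRange_zero, Int.toNat_natCast]

def pvChs (Q : List (Int × Int × Int)) (n B : Int) (k : Nat) : List (PySem.Dict (Bool × Int) Bool) :=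
  List.map (fun t => pvChD Q n B (Int.ofNat t)) (List.range k)

theorem pvChs_zero (Q : List (Int × Int × Int)) (n B : Int) : pvChs Q n B 0 = [] := rfl

theorem pvChs_succ (Q : List (Int × Int × Int)) (n B : Int) (k : Nat) :
    pvChs Q n B (k + 1) = pvChs Q n B k ++ [pvChD Q n B (Int.ofNat k)] := by
  rw [pvChs, List.range_succ, List.map_append]; rfl

theorem pvDown_spec (Q : List (Int × Int × Int)) (n B m : Int)
    (hnb : ∀ i : Int, 0 ≤ i → i < m → ¬(i = B ∨ i > n - 1)) :
    ∀ (k : Nat), (k : Int) ≤ m →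
      ∀ st : PySem.Dict (Bool × Int) Int × List (PySem.Dict (Bool × Int) Bool),
        pvGood Q n B (k : Int) st.1 →
        pvGood Q n B 0 (((PySem.List.pyRange 0 (k : Int) 1).reverse).foldl (pvStepDown Q) st).1 ∧
          (((PySem.List.pyRange 0 (k : Int) 1).reverse).foldl (pvStepDown Q) st).2 =
            pvChs Q n B k ++ st.2 := by
  intro k
  induction k with
  | zero =>
    intro hk st h1
    rw [pvRangeCast]
    simpa [pvChs_zero] using h1
  | succ k ih =>
    rintro hk ⟨n1, c1⟩ h1
    rw [pvRangeCast, List.range_succ, List.map_append, List.reverse_append]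
    simp only [List.map_cons, List.map_nil, List.reverse_cons, List.reverse_nil,
      List.nil_append, List.cons_append, List.foldl_cons]
    have hk' : (k : Int) ≤ m := by push_cast at hk ⊢; omega
    have hnbk : ¬((k : Int) = B ∨ (k : Int) > n - 1) :=
      hnb k (by positivity) (by push_cast at hk; omega)
    have h1' : pvGood Q n B ((k : Int) + 1) n1 := by
      have hcast : ((k + 1 : Nat) : Int) = (k : Int) + 1 := by push_cast; ring
      rwa [hcast] at h1
    obtain ⟨g1, g2⟩ := pvStepDown_spec Q n B (k : Int) n1 c1 hnbk h1'
    obtain ⟨r1, r2⟩ := ih hk' (pvStepDown Q (n1, c1) (k : Int)) g1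
    rw [pvRangeCast] at r1 r2
    refine ⟨r1, ?_⟩
    rw [r2, g2, pvChs_succ]
    simp only [List.append_assoc, List.singleton_append]
    rfl

theorem pvUp_spec (Q : List (Int × Int × Int)) (n B m : Int) (hm0 : 0 ≤ m)
    (hbase : m = B ∨ m > n - 1)
    (hnb : ∀ i : Int, 0 ≤ i → i < m → ¬(i = B ∨ i > n - 1)) :
    ∀ (k : Nat), (k : Int) ≤ m →
      ∀ (res : List Int) (d : Bool) (j : Int), (j = 1 ∨ j = 2 ∨ j = 3) →
        ((PySem.List.pyRange (m - (k : Int)) m 1).foldl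
            (pvStepUp Q (pvChs Q n B m.toNat))
            (res, d, j)).1 = res ++ (pvG Q n B d (m - (k : Int)) j).2 := by
  intro k
  induction k with
  | zero =>
    intro hk res d j hj
    have he : PySem.List.pyRange (m - ((0 : Nat) : Int)) m 1 = [] := by
      rw [PySem.List.pyRange_one]; simp
    rw [he]
    simp [pvG_base Q n B d _ j (by simpa using hbase)]
  | succ k ih =>
    intro hk res d j hj
    have hc1 : ((k + 1 : Nat) : Int) = (k : Int) + 1 := by push_cast; ring
    set i0 : Int := m - ((k + 1 : Nat) : Int) with hi0def
    have hi0a : 0 ≤ i0 := by omega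
    have hi0b : i0 < m := by omega
    have hsucc : i0 + 1 = m - (k : Int) := by omega
    have hnb0 := hnb i0 hi0a hi0b
    rw [PySem.List.pyRange_one_cons hi0b, List.foldl_cons]
    have hC : PySem.List.pyGetD (pvChs Q n B m.toNat) i0 PySem.Dict.empty =
        pvChD Q n B i0 := by
      have h1 : i0 = ((i0.toNat : Nat) : Int) := by omega
      rw [h1, PySem.List.pyGetD_natCast, pvChs,
        PySem.List.getD_map_range _ _ _ _ (by omega)]
      norm_num
    have hmem : (d, j) ∈ pvStates := by
      rw [pvStates_eq]; rcases hj with rfl | rfl | rfl <;> cases d <;> simp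
    have hcget : (pvChD Q n B i0).getD (d, j) false = pvChoice Q n B i0 (d, j) :=
      pvChD_getD Q n B i0 (d, j) hmem
    by_cases hch : pvChoice Q n B i0 (d, j) = true
    · -- switch
      have hp : (PySem.List.pyGetD Q i0 (0, 0, 0)).2.1 ≠ 0 := by
        by_contra hp0
        rw [pvChoice] at hch
        simp [hp0] at hch
      have hcc : ¬(j < 3 ∧ (pvG Q n B d (i0 + 1) (j + 1)).1 < (pvG Q n B (!d) (i0 + 1) 1).1) := by
        rw [pvChoice, if_pos hp] at hch
        simp at hch
        omega
      have hstep : pvStepUp Q (pvChs Q n B m.toNat) (res, d, j) i0 =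
          (res ++ [(PySem.List.pyGetD Q i0 (0, 0, 0)).2.2], !d, 1) := by
        rw [pvStepUp]
        simp only [hC, hcget, hch, if_true]
      rw [hstep]
      have hrec := ih (by omega) (res ++ [(PySem.List.pyGetD Q i0 (0, 0, 0)).2.2]) (!d) 1 (Or.inl rfl)
      rw [← hsucc] at hrec
      rw [hrec, pvG_pause_switch Q n B d i0 j hnb0 hp hcc]
      simp
    · -- no switch
      have hch' : pvChoice Q n B i0 (d, j) = false := by
        cases h : pvChoice Q n B i0 (d, j)
        · rfl
        · exact absurd h hch
      by_cases hp : (PySem.List.pyGetD Q i0 (0, 0, 0)).2.1 ≠ 0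
      · have hcc : j < 3 ∧ (pvG Q n B d (i0 + 1) (j + 1)).1 < (pvG Q n B (!d) (i0 + 1) 1).1 := by
          rw [pvChoice, if_pos hp] at hch'
          simpa using hch'
        have hstep : pvStepUp Q (pvChs Q n B m.toNat) (res, d, j) i0 = (res, d, j + 1) := by
          rw [pvStepUp]
          simp only [hC, hcget, hch', if_false, Bool.false_eq_true, if_pos hp]
        rw [hstep]
        have hj' : j + 1 = 1 ∨ j + 1 = 2 ∨ j + 1 = 3 := by
          rcases hj with rfl | rfl | rfl
          · right; left; norm_num
          · right; right; norm_num
          · exact absurd hcc.1 (by norm_num)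
        have hrec := ih (by omega) res d (j + 1) hj'
        rw [← hsucc] at hrec
        rw [hrec, pvG_pause_stay Q n B d i0 j hnb0 hp hcc]
      · rw [not_not] at hp
        have hstep : pvStepUp Q (pvChs Q n B m.toNat) (res, d, j) i0 = (res, d, j) := by
          rw [pvStepUp]
          simp only [hC, hcget, hch', if_false, Bool.false_eq_true, hp]
          simp
        rw [hstep]
        have hrec := ih (by omega) res d j hj
        rw [← hsucc] at hrec
        rw [hrec, pvG_nopause Q n B d i0 j hnb0 hp]

theorem pvMain : ∀ (P : List (Int × Int)) (B : Int),
    drivers_rek P B = drivers_rek_alt P B := by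
  intro P B
  simp only [drivers_rek, drivers_rek_alt]
  set n : Int := (P.length : Int) with hhn
  set Q : List (Int × Int × Int) := PySem.List.sorted2
    ((PySem.List.pyRange 0 n 1).map (fun i =>
      ((PySem.List.pyGetD P i (0, 0)).1, (PySem.List.pyGetD P i (0, 0)).2, i)))
    (fun t => t.1) (fun t => t.2.1) with hhQ
  set m : Int := if 0 ≤ B ∧ B ≤ n then B else n with hhm
  set nxt0 : PySem.Dict (Bool × Int) Int :=
    pvStates.foldl (fun d s => d.insert s (0 : Int)) PySem.Dict.empty with hhx
  have hn0 : 0 ≤ n := by rw [hhn]; positivity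
  have hm0 : 0 ≤ m := by rw [hhm]; split <;> omega
  have hbase : m = B ∨ m > n - 1 := by
    rw [hhm]; split
    · left; rfl
    · right; omega
  have hnb : ∀ i : Int, 0 ≤ i → i < m → ¬(i = B ∨ i > n - 1) := by
    intro i h0 him
    rw [hhm] at him
    split_ifs at him with h
    · omega
    · push Not at h; omega
  obtain ⟨eA, -⟩ := pvFA_correct Q n B (n - 0).toNat false 0 1 PySem.Dict.empty (le_refl _)
    (by intro k v h; rw [PySem.Dict.get?_empty] at h; cases h)
  rw [eA]
  have hg0 : pvGood Q n B m nxt0 := by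
    intro s hs
    have hz : nxt0.getD s 0 = 0 := by
      rw [pvStates_eq] at hs
      fin_cases hs <;>
        simp [hhx, pvStates_eq, List.foldl, PySem.Dict.getD_insert]
    rw [hz, pvVal, pvG_base Q n B s.1 m s.2 hbase]
  have hcast : ((m.toNat : Nat) : Int) = m := Int.toNat_of_nonneg hm0
  obtain ⟨-, hdn⟩ := pvDown_spec Q n B m hnb m.toNat (by rw [hcast]) (nxt0, [])
    (by rw [hcast]; exact hg0)
  rw [hcast, List.append_nil] at hdn
  have hup := pvUp_spec Q n B m hm0 hbase hnb m.toNat (by rw [hcast]) [] false 1 (Or.inl rfl)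
  rw [hcast, sub_self] at hup
  rw [hdn, hup, List.nil_append]

-- ===== VERDICT (by name: the statement is the Claim_ definition above) =====
theorem drivers_rek_spec : Claim_equal_drivers_rek := by
  intro P B _
  exact pvMain P B
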